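-- pv_equiv track=rewrite | github.com/dowgiert/ASD_ | ASD/s1/z_5.py | NEWTON4
-- ===== SOURCE A (Python) =====
-- def NEWTON4(n):
--     k = 0
--     res = [[1]]
--     for i in range(n-1):
--         temp = [0] + res[-1] + [0]
--         row = []
--         for j in range(len(res[-1])+1):
--             row.append(temp[j] + temp[j+1])
--             k += 1
--         res.append(row)
--     return res, k
-- ===== SOURCE B (Python) =====
-- def NEWTON4(n):
--     res = [[1]]
--     for i in range(1, n):
--         row = [1]
--         c = 1
--         for j in range(1, i + 1):
--             c = c * (i - j + 1) // j
--             row.append(c)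
--         res.append(row)
--     k = sum(len(r) for r in res) - 1
--     return res, k
-- ===== Notes on version B (the rewrite author's own statement) =====
-- stated objective: alternative
-- what changed: Each Pascal row is computed directly by the multiplicative binomial recurrence C(i,j)=C(i,j-1)*(i-j+1)//j instead of summing adjacent entries of a zero-padded copy of the previous row, and the addition counter k is recovered as the total number of entries minus one instead of being incremented inside the inner loop.
import Mathlib
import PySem

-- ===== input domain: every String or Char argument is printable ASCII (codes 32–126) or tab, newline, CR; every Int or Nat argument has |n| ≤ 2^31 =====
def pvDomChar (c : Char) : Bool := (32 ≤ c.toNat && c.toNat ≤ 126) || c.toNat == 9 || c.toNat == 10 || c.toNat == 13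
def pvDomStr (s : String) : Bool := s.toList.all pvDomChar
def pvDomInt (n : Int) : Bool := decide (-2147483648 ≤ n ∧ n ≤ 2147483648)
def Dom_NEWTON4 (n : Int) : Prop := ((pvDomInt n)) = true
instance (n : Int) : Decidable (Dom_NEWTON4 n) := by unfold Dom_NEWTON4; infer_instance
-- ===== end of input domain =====

-- B replaces A's shift-and-add construction of each Pascal row by a direct multiplicative
-- binomial-coefficient computation per row, recovering the addition count from the row lengths.


-- ===== PORT A =====
-- loop body of A's 'for i in range(n-1)': temp = [0]+res[-1]+[0]; inner loop over
-- range(len(res[-1])+1) appends temp[j]+temp[j+1] to row and increments k; res.append(row)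
def pvStepA (st : List (List Int) × Int) : List (List Int) × Int :=
  let temp : List Int := [0] ++ PySem.List.pyGetD st.1 (-1) [] ++ [0]
  let rk :=
    (PySem.List.pyRange 0 (((PySem.List.pyGetD st.1 (-1) ([] : List Int)).length : Int) + 1)).foldl
      (fun rk j => (rk.1 ++ [PySem.List.pyGetD temp j 0 + PySem.List.pyGetD temp (j + 1) 0], rk.2 + 1))
      (([] : List Int), st.2)
  (st.1 ++ [rk.1], rk.2)

def NEWTON4 (n : Int) : List (List Int) × Int :=
  (PySem.List.pyRange 0 (n - 1)).foldl (fun st _i => pvStepA st) ([[1]], 0)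

-- ===== PORT B =====
-- B's inner loop: row = [1]; c = 1; for j in range(1, i+1): c = c*(i-j+1)//j; row.append(c)
def pvRowB (i : Int) : List Int × Int :=
  (PySem.List.pyRange 1 (i + 1)).foldl
    (fun rc j =>
      let c := PySem.Int.floordiv (rc.2 * (i - j + 1)) j
      (rc.1 ++ [c], c))
    ([1], 1)

def NEWTON4_alt (n : Int) : List (List Int) × Int :=
  let res := (PySem.List.pyRange 1 n).foldl (fun res i => res ++ [(pvRowB i).1]) [[1]]
  (res, res.foldl (fun s r => s + (r.length : Int)) 0 - 1)

-- ===== PRECONDITION & SPEC =====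
def Spec_NEWTON4 (n : Int) (out : List (List Int) × Int) : Prop := out = NEWTON4_alt n
instance (n : Int) (out : List (List Int) × Int) : Decidable (Spec_NEWTON4 n out) := by unfold Spec_NEWTON4; infer_instance

-- ===== CLAIM (what is proved, stated in full; the proofs are below) =====
def Claim_equal_NEWTON4 : Prop := ∀ (n : Int), Dom_NEWTON4 n → Spec_NEWTON4 n (NEWTON4 n)

-- ===== LEMMAS AND PROOFS =====

-- Pascal row i truncated/padded to len entries (entries past index i are 0 = choose i j)
def pvBinRowE (i len : Nat) : List Int := (List.range len).map (fun j => ((i.choose j : Nat) : Int))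

-- the first t+1 rows of Pascal's triangle
def pvTri (t : Nat) : List (List Int) := (List.range (t + 1)).map (fun i => pvBinRowE i (i + 1))

def pvSumLen (t : Nat) : Int := (pvTri t).foldl (fun s r => s + (r.length : Int)) 0

theorem pvTri_succ (t : Nat) :
    pvTri (t + 1) = pvTri t ++ [pvBinRowE (t + 1) (t + 2)] := by
  simp [pvTri, List.range_succ]

theorem pvBinRowE_getD (i len m : Nat) (hlen : i < len) :
    (pvBinRowE i len).getD m 0 = ((i.choose m : Nat) : Int) := by
  by_cases h : m < len
  · exact PySem.List.getD_map_range _ _ _ _ h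
  · rw [List.getD_eq_getElem?_getD, List.getElem?_eq_none (by simpa [pvBinRowE] using h)]
    have : i.choose m = 0 := Nat.choose_eq_zero_of_lt (by omega)
    simp [this]

theorem pvBinRowE_snoc (i len : Nat) (h : i < len) :
    pvBinRowE i len ++ [(0 : Int)] = pvBinRowE i (len + 1) := by
  have : i.choose len = 0 := Nat.choose_eq_zero_of_lt h
  simp [pvBinRowE, List.range_succ, this]

theorem pvBinRowE_snoc_choose (i len : Nat) :
    pvBinRowE i len ++ [((i.choose len : Nat) : Int)] = pvBinRowE i (len + 1) := by
  simp [pvBinRowE, List.range_succ]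

-- one entry of A's inner loop equals a binomial of the next row
theorem pvTempEntry (t : Nat) (j : Nat) :
    PySem.List.pyGetD ([0] ++ pvBinRowE t (t + 1) ++ [0] : List Int) ((j : Int)) 0
      + PySem.List.pyGetD ([0] ++ pvBinRowE t (t + 1) ++ [0] : List Int) ((j : Int) + 1) 0
      = (((t + 1).choose j : Nat) : Int) := by
  have htemp : ([0] ++ pvBinRowE t (t + 1) ++ [0] : List Int) = 0 :: pvBinRowE t (t + 2) := by
    rw [List.append_assoc, pvBinRowE_snoc t (t + 1) (by omega)]; rfl
  have hc : ((j : Int) + 1) = ((j + 1 : Nat) : Int) := by push_cast; ring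
  rw [htemp, hc, PySem.List.pyGetD_natCast, PySem.List.pyGetD_natCast]
  cases j with
  | zero =>
      have h1 : ((0 : Int) :: pvBinRowE t (t + 2)).getD 0 0 = 0 := rfl
      have h2 : ((0 : Int) :: pvBinRowE t (t + 2)).getD (0 + 1) 0 = (pvBinRowE t (t + 2)).getD 0 0 := rfl
      rw [h1, h2, pvBinRowE_getD t (t + 2) 0 (by omega)]
      simp
  | succ m =>
      have h1 : ((0 : Int) :: pvBinRowE t (t + 2)).getD (m + 1) 0 = (pvBinRowE t (t + 2)).getD m 0 := rfl
      have h2 : ((0 : Int) :: pvBinRowE t (t + 2)).getD (m + 1 + 1) 0 = (pvBinRowE t (t + 2)).getD (m + 1) 0 := rfl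
      rw [h1, h2, pvBinRowE_getD t (t + 2) m (by omega), pvBinRowE_getD t (t + 2) (m + 1) (by omega)]
      rw [Nat.choose_succ_succ]
      push_cast; ring

-- appending f j and counting, as one pair-valued fold
theorem pvPairFold {α β : Type} (f : β → α) (l : List β) (acc : List α) (k : Int) :
    l.foldl (fun rk j => (rk.1 ++ [f j], rk.2 + 1)) (acc, k) = (acc ++ l.map f, k + l.length) := by
  induction l generalizing acc k with
  | nil => simp
  | cons x xs ih =>
      simp only [List.foldl_cons, List.map_cons, ih]
      rw [Prod.mk.injEq]
      constructor
      · simp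
      · simp only [List.length_cons]
        push_cast
        ring

-- A's inner loop on the padded previous row builds the next Pascal row and adds t+2 to k
theorem pvInnerA (t : Nat) (k : Int) :
    (PySem.List.pyRange 0 ((t : Int) + 2)).foldl
      (fun rk j => (rk.1 ++ [PySem.List.pyGetD ([0] ++ pvBinRowE t (t + 1) ++ [0] : List Int) j 0
          + PySem.List.pyGetD ([0] ++ pvBinRowE t (t + 1) ++ [0] : List Int) (j + 1) 0], rk.2 + 1))
      (([] : List Int), k)
      = (pvBinRowE (t + 1) (t + 2), k + ((t : Int) + 2)) := by
  rw [PySem.List.pyRange_one, List.foldl_map, pvPairFold]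
  have hn : ((t : Int) + 2 - 0).toNat = t + 2 := by omega
  rw [hn, Prod.mk.injEq]
  constructor
  · rw [List.nil_append]
    unfold pvBinRowE
    apply List.map_congr_left
    intro m _
    have h0 : (0 : Int) + (m : Int) = (m : Int) := by ring
    rw [h0]
    exact pvTempEntry t m
  · simp

theorem pvStepA_tri (t : Nat) (k : Int) :
    pvStepA (pvTri t, k) = (pvTri (t + 1), k + ((t : Int) + 2)) := by
  have hlast : PySem.List.pyGetD (pvTri t) (-1) ([] : List Int) = pvBinRowE t (t + 1) := by
    rw [pvTri]
    rw [List.range_succ, List.map_append]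
    exact PySem.List.pyGetD_neg_one_append_singleton _ _ _
  have hlen : ((pvBinRowE t (t + 1)).length : Int) + 1 = (t : Int) + 2 := by
    simp [pvBinRowE]
    ring
  unfold pvStepA
  simp only [hlast, hlen, pvInnerA, pvTri_succ]

theorem pvSumLen_succ (t : Nat) : pvSumLen (t + 1) = pvSumLen t + ((t : Int) + 2) := by
  simp [pvSumLen, pvTri_succ, pvBinRowE]

theorem pvA_fold (t : Nat) :
    (List.range t).foldl (fun st (_ : Nat) => pvStepA st) ([[1]], 0)
      = (pvTri t, pvSumLen t - 1) := by
  induction t with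
  | zero => simp [pvTri, pvSumLen, pvBinRowE]
  | succ t ih =>
      rw [List.range_succ, List.foldl_append, ih]
      simp only [List.foldl_cons, List.foldl_nil, pvStepA_tri, pvSumLen_succ]
      ring_nf

-- B's inner loop computes the binomial row by the multiplicative recurrence
theorem pvRowB_fold (t s : Nat) (hs : s ≤ t + 1) :
    (PySem.List.pyRange 1 ((s : Int) + 1)).foldl
      (fun rc j =>
        let c := PySem.Int.floordiv (rc.2 * (((t : Int) + 1) - j + 1)) j
        (rc.1 ++ [c], c))
      ([1], 1)
      = (pvBinRowE (t + 1) (s + 1), (((t + 1).choose s : Nat) : Int)) := by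
  induction s with
  | zero =>
      rw [show ((0 : Nat) : Int) + 1 = 1 by ring, PySem.List.pyRange_one_eq_nil le_rfl]
      simp [pvBinRowE]
  | succ s ih =>
      have hs' : s ≤ t + 1 := by omega
      have hb : ((s + 1 : Nat) : Int) + 1 = ((s : Int) + 1) + 1 := by push_cast; ring
      rw [hb, PySem.List.pyRange_one_succ_right (by omega), List.foldl_append, ih hs']
      simp only [List.foldl_cons, List.foldl_nil]
      have harg : ((t : Int) + 1) - ((s : Int) + 1) + 1 = ((t + 1 - s : Nat) : Int) := by omega
      have hprod : (((t + 1).choose s : Nat) : Int) * ((t + 1 - s : Nat) : Int)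
          = (((t + 1).choose s * (t + 1 - s) : Nat) : Int) := by push_cast; ring
      have hc : ((s : Int) + 1) = ((s + 1 : Nat) : Int) := by push_cast; ring
      rw [harg, hprod, hc, PySem.Int.floordiv_natCast]
      have hdiv : ((t + 1).choose s * (t + 1 - s)) / (s + 1) = (t + 1).choose (s + 1) := by
        rw [← Nat.choose_succ_right_eq]
        exact Nat.mul_div_cancel _ (by omega)
      rw [hdiv, Prod.mk.injEq]
      exact ⟨pvBinRowE_snoc_choose (t + 1) (s + 1), rfl⟩

theorem pvRowB_eq (t : Nat) : (pvRowB ((t : Int) + 1)).1 = pvBinRowE (t + 1) (t + 2) := by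
  have hb : ((t : Int) + 1) + 1 = ((t + 1 : Nat) : Int) + 1 := by push_cast; ring
  unfold pvRowB
  rw [hb, pvRowB_fold t (t + 1) le_rfl]

theorem pvB_fold (t : Nat) :
    (List.range t).foldl (fun res (k : Nat) => res ++ [(pvRowB (1 + (k : Int))).1]) [[1]]
      = pvTri t := by
  induction t with
  | zero => simp [pvTri, pvBinRowE]
  | succ t ih =>
      rw [List.range_succ, List.foldl_append, ih]
      simp only [List.foldl_cons, List.foldl_nil]
      rw [show (1 : Int) + (t : Int) = (t : Int) + 1 by ring, pvRowB_eq, pvTri_succ]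

-- ===== VERDICT (by name: the statement is the Claim_ definition above) =====
theorem NEWTON4_spec : Claim_equal_NEWTON4 := by
  intro n _
  unfold Spec_NEWTON4 NEWTON4 NEWTON4_alt
  rw [PySem.List.pyRange_one 0 (n - 1), PySem.List.pyRange_one 1 n,
    show n - 1 - 0 = n - 1 by ring, List.foldl_map, List.foldl_map,
    pvA_fold ((n - 1).toNat), pvB_fold ((n - 1).toNat)]
  rfl
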